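-- pv_equiv track=rewrite | github.com/mikolajkazmierczak/mars-rover-problem | main.py | constraint_row_col_sum
-- ===== SOURCE A (Python) =====
-- def constraint_row_col_sum(path):
--   # Robot cannot time travel (go to two points at the same time)
--   for row in path:
--     row_sum = sum([i for i in row])
--     if row_sum > 1:
--       return False
--   for col in range(len(path)):
--     col_sum = sum([path[j][col] for j in range(len(path))])
--     if col_sum > 1:
--       return False
--   return True
-- ===== SOURCE B (Python) =====
-- def constraint_row_col_sum(path):
--     n = len(path)
--     col_sums = [0] * n
--     for row in path:
--         if sum(row) > 1:
--             return False
--         col_sums = [s + (row[c] if c < len(row) else 0) for c, s in enumerate(col_sums)]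
--     return all(s <= 1 for s in col_sums)
-- ===== Notes on version B (the rewrite author's own statement) =====
-- stated objective: alternative
-- what changed: Replaces A's second nested pass over all columns by a single pass over the rows that checks each row sum and simultaneously maintains a column-sum accumulator, followed by one scan of the accumulator.
-- crash fix: On ragged matrices where no row sum exceeds 1, some row is shorter than len(path), and every fully-populated column sums to at most 1, A raises IndexError in its column pass; B treats missing entries as 0 and returns the resulting boolean. — e.g. on constraint_row_col_sum([[0, 0], [0]]): A raises IndexError, B returns true
import Mathlib
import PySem

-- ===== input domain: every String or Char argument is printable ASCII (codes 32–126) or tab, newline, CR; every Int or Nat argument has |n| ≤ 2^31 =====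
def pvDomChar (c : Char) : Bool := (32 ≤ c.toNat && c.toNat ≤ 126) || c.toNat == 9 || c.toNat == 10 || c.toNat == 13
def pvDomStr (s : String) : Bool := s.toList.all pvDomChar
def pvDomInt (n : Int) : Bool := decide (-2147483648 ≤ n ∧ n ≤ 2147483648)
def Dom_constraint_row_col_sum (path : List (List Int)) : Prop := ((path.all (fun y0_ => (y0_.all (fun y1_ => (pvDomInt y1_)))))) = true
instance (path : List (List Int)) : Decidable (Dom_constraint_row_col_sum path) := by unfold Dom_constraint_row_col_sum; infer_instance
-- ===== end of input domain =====

-- B replaces A's separate nested column pass by one row pass with a maintained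
-- column-sum accumulator (objective: alternative decomposition, same cost).

-- ===== PORT A =====
-- first loop: 'for row in path: if sum([i for i in row]) > 1: return False'
-- (some false = early return, none = fell through)
def aRowLoop : List (List Int) → Option Bool
  | [] => none
  | row :: rest =>
    if 1 < (row.map (fun i => i)).sum then some false else aRowLoop rest

-- 'sum([path[j][col] for j in range(len(path))])'; the pyGetD defaults are hit
-- exactly where Python raises IndexError, which Pre_ excludes
def aColSum (path : List (List Int)) (col : Int) : Int :=
  ((PySem.List.pyRange 0 path.length 1).map
    (fun j => PySem.List.pyGetD (PySem.List.pyGetD path j []) col 0)).sum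

-- second loop over 'range(len(path))'
def aColLoop (path : List (List Int)) : List Int → Bool
  | [] => true
  | c :: cs => if 1 < aColSum path c then false else aColLoop path cs

def constraint_row_col_sum (path : List (List Int)) : Bool :=
  match aRowLoop path with
  | some b => b
  | none => aColLoop path (PySem.List.pyRange 0 path.length 1)

-- ===== PORT B =====
-- 'col_sums = [s + (row[c] if c < len(row) else 0) for c, s in enumerate(col_sums)]'
-- (the guard c < len(row) keeps the index in range, so pyGetD is exact)
def bAcc (colSums row : List Int) : List Int :=
  (PySem.List.enumerate colSums 0).map
    (fun p => p.2 + (if p.1 < (row.length : Int) then PySem.List.pyGetD row p.1 0 else 0))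

-- the single pass over the rows; none = early 'return False'
def bLoop : List (List Int) → List Int → Option (List Int)
  | [], colSums => some colSums
  | row :: rest, colSums =>
    if 1 < row.sum then none else bLoop rest (bAcc colSums row)

def constraint_row_col_sum_alt (path : List (List Int)) : Bool :=
  match bLoop path (List.replicate path.length 0) with
  | none => false
  | some colSums => colSums.all (fun s => s ≤ 1)

-- ===== PRECONDITION & SPEC =====
-- helpers the precondition is phrased with (they do not touch either port):
-- the sum of column c, reading a missing entry of a short row as 0
def colS (path : List (List Int)) (c : Nat) : Int :=
  (path.map (fun r => r.getD c 0)).sum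
-- the length of the shortest row, capped at len(path)
def minRowLen (path : List (List Int)) : Nat :=
  path.foldr (fun r acc => min r.length acc) path.length

-- exactly the inputs on which Python A raises IndexError: no row sum exceeds 1
-- (so the row pass falls through), some row is shorter than len(path), and every
-- column before the first short one sums to at most 1 (so the column pass reaches it)
def pythonRaisesA (path : List (List Int)) : Prop :=
  minRowLen path < path.length ∧ (∀ row ∈ path, row.sum ≤ 1) ∧
    (∀ c < minRowLen path, colS path c ≤ 1)

-- Pre_ excludes exactly the inputs on which Python A raises IndexError (pythonRaisesA)
def Pre_constraint_row_col_sum (path : List (List Int)) : Prop := ¬ pythonRaisesA path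
instance (path : List (List Int)) : Decidable (Pre_constraint_row_col_sum path) := by
  unfold Pre_constraint_row_col_sum pythonRaisesA; infer_instance

def pvWitness_constraint_row_col_sum : List (List Int) := [[1, 0], [0, 1]]

-- On ragged matrices where no row sum exceeds 1, some row is shorter than len(path),
-- and every fully-populated column sums to at most 1, A raises IndexError in its
-- column pass; B treats missing entries as 0 and returns the resulting boolean.
def Raises_constraint_row_col_sum (path : List (List Int)) : Prop := pythonRaisesA path
instance (path : List (List Int)) : Decidable (Raises_constraint_row_col_sum path) := by
  unfold Raises_constraint_row_col_sum pythonRaisesA; infer_instance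

def pvRaiseWitness_constraint_row_col_sum : List (List Int) := [[0, 0], [0]]
def pvRaiseWitnessOut_constraint_row_col_sum : Bool := true

def Spec_constraint_row_col_sum (path : List (List Int)) (out : Bool) : Prop :=
  out = constraint_row_col_sum_alt path
instance (path : List (List Int)) (out : Bool) : Decidable (Spec_constraint_row_col_sum path out) := by
  unfold Spec_constraint_row_col_sum; infer_instance

-- ===== CLAIM (what is proved, stated in full; the proofs are below) =====
def Claim_equal_constraint_row_col_sum : Prop :=
  ∀ (path : List (List Int)), Dom_constraint_row_col_sum path →
    Pre_constraint_row_col_sum path →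
    Spec_constraint_row_col_sum path (constraint_row_col_sum path)

def Claim_raises_constraint_row_col_sum : Prop :=
  (∀ (path : List (List Int)), Dom_constraint_row_col_sum path →
      Raises_constraint_row_col_sum path → ¬ Pre_constraint_row_col_sum path) ∧
    (Dom_constraint_row_col_sum pvRaiseWitness_constraint_row_col_sum ∧
      Raises_constraint_row_col_sum pvRaiseWitness_constraint_row_col_sum ∧
      constraint_row_col_sum_alt pvRaiseWitness_constraint_row_col_sum =
        pvRaiseWitnessOut_constraint_row_col_sum)

-- ===== LEMMAS AND PROOFS =====

theorem aRowLoop_eq (rows : List (List Int)) :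
    aRowLoop rows = if rows.any (fun r => decide (1 < r.sum)) then some false else none := by
  induction rows with
  | nil => simp [aRowLoop]
  | cons row rest ih =>
    simp only [aRowLoop, List.map_id_fun', id, List.any_cons]
    by_cases h : 1 < row.sum <;> simp [h, ih]

theorem bLoop_eq (rows : List (List Int)) (cs : List Int) :
    bLoop rows cs = if rows.any (fun r => decide (1 < r.sum)) then none
      else some (rows.foldl bAcc cs) := by
  induction rows generalizing cs with
  | nil => simp [bLoop]
  | cons row rest ih =>
    simp only [bLoop, List.any_cons, List.foldl_cons]
    by_cases h : 1 < row.sum <;> simp [h, ih]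

theorem length_bAcc (cs row : List Int) : (bAcc cs row).length = cs.length := by
  simp [bAcc, PySem.List.length_enumerate]

theorem getElem_bAcc (cs row : List Int) (k : Nat) (hk : k < cs.length) :
    (bAcc cs row)[k]'(by rw [length_bAcc]; exact hk) =
      cs[k] + (if k < row.length then row.getD k 0 else 0) := by
  simp only [bAcc, List.getElem_map, PySem.List.getElem_enumerate, zero_add]
  by_cases h : k < row.length
  · simp [h, PySem.List.pyGetD_natCast]
  · have : ¬ ((k : Int) < (row.length : Int)) := by exact_mod_cast h
    simp [h, this]

theorem length_foldl_bAcc (rows : List (List Int)) (cs : List Int) :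
    (rows.foldl bAcc cs).length = cs.length := by
  induction rows generalizing cs with
  | nil => rfl
  | cons row rest ih => simpa [length_bAcc] using ih (bAcc cs row)

theorem ite_getD (r : List Int) (k : Nat) :
    (if k < r.length then r.getD k 0 else 0) = r.getD k 0 := by
  by_cases h : k < r.length
  · simp [h]
  · rw [if_neg h, List.getD_eq_default r 0 (not_lt.mp h)]

theorem getD_bAcc (cs row : List Int) (k : Nat) (hk : k < cs.length) :
    (bAcc cs row).getD k 0 = cs.getD k 0 + row.getD k 0 := by
  have hk' : k < (bAcc cs row).length := by rw [length_bAcc]; exact hk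
  rw [List.getD_eq_getElem _ _ hk', List.getD_eq_getElem _ _ hk, getElem_bAcc cs row k hk,
    ite_getD]

theorem getD_foldl_bAcc (rows : List (List Int)) (cs : List Int) (k : Nat)
    (hk : k < cs.length) :
    (rows.foldl bAcc cs).getD k 0 = cs.getD k 0 + colS rows k := by
  induction rows generalizing cs with
  | nil => simp [colS]
  | cons row rest ih =>
    have hk2 : k < (bAcc cs row).length := by rw [length_bAcc]; exact hk
    rw [List.foldl_cons, ih (bAcc cs row) hk2, getD_bAcc cs row k hk]
    simp [colS, add_assoc]

theorem colSum_eq (path : List (List Int)) (k : Nat) :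
    aColSum path (k : Int) = colS path k := by
  unfold aColSum colS
  rw [show (fun j => PySem.List.pyGetD (PySem.List.pyGetD path j ([] : List Int)) (k : Int) 0)
        = (fun r => PySem.List.pyGetD r (k : Int) 0) ∘ (fun j => PySem.List.pyGetD path j [])
      from rfl, ← List.map_map, PySem.List.map_pyGetD_pyRange_zero']
  simp [PySem.List.pyGetD_natCast]

theorem aColLoop_eq (path : List (List Int)) (l : List Int) :
    aColLoop path l = l.all (fun c => decide (aColSum path c ≤ 1)) := by
  induction l with
  | nil => simp [aColLoop]
  | cons c cs ih =>
    simp only [aColLoop, List.all_cons]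
    by_cases h : 1 < aColSum path c
    · simp [h, not_le.mpr h]
    · simp [h, not_lt.mp h, ih]

-- ===== VERDICT (by name: the statement is the Claim_ definition above) =====
theorem constraint_row_col_sum_spec : Claim_equal_constraint_row_col_sum := by
  intro path _ _
  unfold Spec_constraint_row_col_sum constraint_row_col_sum constraint_row_col_sum_alt
  rw [aRowLoop_eq, bLoop_eq]
  by_cases hany : path.any (fun r => decide (1 < r.sum))
  · simp [hany]
  · simp only [hany, Bool.false_eq_true, if_false]
    rw [aColLoop_eq]
    have hlen : (path.foldl bAcc (List.replicate path.length 0)).length = path.length := by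
      simp [length_foldl_bAcc]
    have hval : ∀ k, k < path.length →
        (path.foldl bAcc (List.replicate path.length 0)).getD k 0 = colS path k := by
      intro k hk
      rw [getD_foldl_bAcc path _ k (by simpa using hk)]
      simp
    rw [Bool.eq_iff_iff]
    simp only [List.all_eq_true]
    constructor
    · intro h s hs
      rcases List.mem_iff_getElem.mp hs with ⟨k, hk, rfl⟩
      rw [hlen] at hk
      have := h (k : Int) (by
        rw [PySem.List.mem_pyRange_one]
        exact ⟨by positivity, by exact_mod_cast hk⟩)
      rw [colSum_eq path k] at this
      have hg : (path.foldl bAcc (List.replicate path.length 0))[k] = colS path k := by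
        rw [← List.getD_eq_getElem _ 0 (by rw [hlen]; exact hk)]; exact hval k hk
      simpa [hg] using this
    · intro h c hc
      rw [PySem.List.mem_pyRange_one] at hc
      obtain ⟨h0, hn⟩ := hc
      have hk : c.toNat < path.length := by omega
      have hc' : c = ((c.toNat : Nat) : Int) := by omega
      rw [hc', colSum_eq path c.toNat]
      have hkl : c.toNat < (path.foldl bAcc (List.replicate path.length 0)).length := by
        rw [hlen]; exact hk
      have hmem : (path.foldl bAcc (List.replicate path.length 0)).getD c.toNat 0
          ∈ path.foldl bAcc (List.replicate path.length 0) := by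
        rw [List.getD_eq_getElem _ _ hkl]
        exact List.getElem_mem hkl
      have := h _ hmem
      rw [hval c.toNat hk] at this
      simpa using this

def constraint_row_col_sum_raises : Claim_raises_constraint_row_col_sum := by
  unfold Claim_raises_constraint_row_col_sum
  exact ⟨fun path _ hr hp => hp hr, by decide⟩
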